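-- pv_equiv track=rewrite | github.com/ajayprashar/chi-data-dictionary-catalog | scripts/upload_parquet_to_airtable.py | build_display_name
-- ===== SOURCE A (Python) =====
-- from typing import Any, Dict, Iterable, List, Tuple
--
-- def build_display_name(table_type: str, row_fields: Dict[str, str], upsert_key: str) -> str:
--     """
--     Human-friendly Name value for Airtable views/interfaces.
--     The upsert_key remains the technical identity for synchronization.
--     """
--     semantic_id = (row_fields.get("semantic_id") or "").strip()
--     if table_type in ("catalog", "dictionary"):
--         return semantic_id or upsert_key
--     if table_type == "adt":
--         field_id = (row_fields.get("field_id") or "").strip()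
--         # Keep the primary label short for steward scanning; the full identity
--         # still lives in explicit columns plus the stable upsert_key.
--         return " | ".join([p for p in [field_id, semantic_id] if p]) or upsert_key
--     if table_type == "ccda":
--         section_name = (row_fields.get("section_name") or "").strip()
--         entry_type = (row_fields.get("entry_type") or "").strip()
--         xml_path = (row_fields.get("xml_path") or "").strip()
--         return " | ".join([p for p in [semantic_id, section_name, entry_type, xml_path] if p]) or upsert_key
--     if table_type == "availability":
--         source_id = (row_fields.get("source_id") or "").strip()
--         availability = (row_fields.get("availability") or "").strip()
--         return " | ".join([p for p in [source_id, semantic_id, availability] if p]) or upsert_key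
--     if table_type == "fhir_inventory":
--         fhir_resource = (row_fields.get("fhir_resource") or "").strip()
--         fhir_path = (row_fields.get("fhir_path") or "").strip()
--         return " | ".join([p for p in [semantic_id, fhir_resource, fhir_path] if p]) or upsert_key
--     if table_type == "business_rules":
--         rule_id = (row_fields.get("rule_id") or "").strip()
--         rule_name = (row_fields.get("rule_name") or "").strip()
--         return " | ".join([p for p in [semantic_id, rule_id, rule_name] if p]) or upsert_key
--     return upsert_key
-- ===== SOURCE B (Python) =====
-- _RANK = {
--     "catalog": {"semantic_id": 0},
--     "dictionary": {"semantic_id": 0},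
--     "adt": {"field_id": 0, "semantic_id": 1},
--     "ccda": {"semantic_id": 0, "section_name": 1, "entry_type": 2, "xml_path": 3},
--     "availability": {"source_id": 0, "semantic_id": 1, "availability": 2},
--     "fhir_inventory": {"semantic_id": 0, "fhir_resource": 1, "fhir_path": 2},
--     "business_rules": {"semantic_id": 0, "rule_id": 1, "rule_name": 2},
-- }
--
-- def build_display_name(table_type: str, row_fields, upsert_key: str) -> str:
--     rank = _RANK.get(table_type)
--     if rank is None:
--         return upsert_key
--     # One pass over the row's items: drop each relevant value into its slot.
--     slots = [None] * len(rank)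
--     for k, v in row_fields.items():
--         r = rank.get(k)
--         if r is not None and slots[r] is None:
--             slots[r] = v
--     # One pass over the slots: strip and accumulate the display string directly.
--     out = ""
--     for s in slots:
--         p = (s or "").strip()
--         if p:
--             out = p if not out else out + " | " + p
--     return out or upsert_key
-- ===== Notes on version B (the rewrite author's own statement) =====
-- stated objective: alternative
-- what changed: Replaced A's seven hand-written branch/join cases by a rank table (table_type -> field key -> slot index), a single pass over the row's items that drops each relevant value into its slot (instead of seven sets of dict lookups), and a single accumulator pass that builds the display string directly (instead of list-comprehension filter plus str.join).
import Mathlib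
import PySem

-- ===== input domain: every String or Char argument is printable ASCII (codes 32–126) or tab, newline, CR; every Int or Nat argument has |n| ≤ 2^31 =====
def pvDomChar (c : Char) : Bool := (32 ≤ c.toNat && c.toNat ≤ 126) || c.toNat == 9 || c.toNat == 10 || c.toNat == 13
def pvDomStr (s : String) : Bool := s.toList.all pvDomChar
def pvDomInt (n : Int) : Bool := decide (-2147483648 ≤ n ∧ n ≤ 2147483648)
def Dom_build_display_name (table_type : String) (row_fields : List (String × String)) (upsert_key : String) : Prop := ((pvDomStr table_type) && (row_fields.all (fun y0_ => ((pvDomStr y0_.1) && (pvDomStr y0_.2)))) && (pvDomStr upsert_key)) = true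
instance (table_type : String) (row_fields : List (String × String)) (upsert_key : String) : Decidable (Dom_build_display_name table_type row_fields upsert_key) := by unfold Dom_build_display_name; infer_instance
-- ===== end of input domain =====

-- B replaces A's seven hand-written join branches by a rank table (table_type -> key -> slot index),
-- a single pass over the row's items dropping each value into its slot, and a single accumulator
-- pass that assembles the display string directly; objective: alternative (data-driven single pass).

-- ===== PORT A =====
-- (row_fields.get(k) or "").strip()  — get returns first match or None; `or ""` maps None/"" to "",
-- then strip; strip "" = "", so Option.getD "" is exact.
def pvAField (row_fields : List (String × String)) (k : String) : String :=
  PySem.Str.strip (((PySem.Dict.mk row_fields).get? k).getD "")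

-- " | ".join([p for p in ps if p]) — string truthiness is nonemptiness
def pvAJoin (ps : List String) : String :=
  PySem.Str.join " | " (ps.filter (fun p => p != ""))

def build_display_name (table_type : String) (row_fields : List (String × String)) (upsert_key : String) : String :=
  let semantic_id := pvAField row_fields "semantic_id"
  if table_type == "catalog" || table_type == "dictionary" then
    (if semantic_id == "" then upsert_key else semantic_id)
  else if table_type == "adt" then
    let field_id := pvAField row_fields "field_id"
    let j := pvAJoin [field_id, semantic_id]
    if j == "" then upsert_key else j
  else if table_type == "ccda" then
    let section_name := pvAField row_fields "section_name"
    let entry_type := pvAField row_fields "entry_type"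
    let xml_path := pvAField row_fields "xml_path"
    let j := pvAJoin [semantic_id, section_name, entry_type, xml_path]
    if j == "" then upsert_key else j
  else if table_type == "availability" then
    let source_id := pvAField row_fields "source_id"
    let availability := pvAField row_fields "availability"
    let j := pvAJoin [source_id, semantic_id, availability]
    if j == "" then upsert_key else j
  else if table_type == "fhir_inventory" then
    let fhir_resource := pvAField row_fields "fhir_resource"
    let fhir_path := pvAField row_fields "fhir_path"
    let j := pvAJoin [semantic_id, fhir_resource, fhir_path]
    if j == "" then upsert_key else j
  else if table_type == "business_rules" then
    let rule_id := pvAField row_fields "rule_id"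
    let rule_name := pvAField row_fields "rule_name"
    let j := pvAJoin [semantic_id, rule_id, rule_name]
    if j == "" then upsert_key else j
  else upsert_key

-- ===== PORT B =====
-- _RANK: table_type -> (row_fields key -> slot index)
def pvRank : PySem.Dict String (PySem.Dict String Nat) :=
  PySem.Dict.mk
    [ ("catalog", PySem.Dict.mk [("semantic_id", 0)])
    , ("dictionary", PySem.Dict.mk [("semantic_id", 0)])
    , ("adt", PySem.Dict.mk [("field_id", 0), ("semantic_id", 1)])
    , ("ccda", PySem.Dict.mk [("semantic_id", 0), ("section_name", 1), ("entry_type", 2), ("xml_path", 3)])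
    , ("availability", PySem.Dict.mk [("source_id", 0), ("semantic_id", 1), ("availability", 2)])
    , ("fhir_inventory", PySem.Dict.mk [("semantic_id", 0), ("fhir_resource", 1), ("fhir_path", 2)])
    , ("business_rules", PySem.Dict.mk [("semantic_id", 0), ("rule_id", 1), ("rule_name", 2)]) ]

-- loop body of `for k, v in row_fields.items(): r = rank.get(k); if r is not None and slots[r] is None: slots[r] = v`
def pvFill (rank : PySem.Dict String Nat) (slots : List (Option String)) (kv : String × String) : List (Option String) :=
  match rank.get? kv.1 with
  | some r => if (slots.getD r none).isNone then slots.set r (some kv.2) else slots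
  | none => slots

-- `out = p if not out else out + " | " + p` guarded by `if p:`
def pvStep (out p : String) : String :=
  if p == "" then out else if out == "" then p else out ++ " | " ++ p

-- loop body of `p = (s or "").strip(); if p: ...`
def pvEmit (out : String) (s : Option String) : String :=
  pvStep out (PySem.Str.strip (s.getD ""))

def build_display_name_alt (table_type : String) (row_fields : List (String × String)) (upsert_key : String) : String :=
  match pvRank.get? table_type with
  | none => upsert_key
  | some rank =>
    let slots := row_fields.foldl (pvFill rank) (List.replicate rank.size none)
    let out := slots.foldl pvEmit ""
    if out == "" then upsert_key else out

-- ===== PRECONDITION & SPEC =====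
def Spec_build_display_name (table_type : String) (row_fields : List (String × String)) (upsert_key : String) (out : String) : Prop := out = build_display_name_alt table_type row_fields upsert_key
instance (table_type : String) (row_fields : List (String × String)) (upsert_key : String) (out : String) : Decidable (Spec_build_display_name table_type row_fields upsert_key out) := by unfold Spec_build_display_name; infer_instance

-- ===== CLAIM (what is proved, stated in full; the proofs are below) =====
def Claim_equal_build_display_name : Prop := ∀ (table_type : String) (row_fields : List (String × String)) (upsert_key : String), Dom_build_display_name table_type row_fields upsert_key → Spec_build_display_name table_type row_fields upsert_key (build_display_name table_type row_fields upsert_key)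

-- ===== LEMMAS AND PROOFS =====

-- unfold B once the table lookup is known
theorem pvAlt_some (tt : String) (rf : List (String × String)) (uk : String)
    (rank : PySem.Dict String Nat) (h : pvRank.get? tt = some rank) :
    build_display_name_alt tt rf uk =
      (if (rf.foldl (pvFill rank) (List.replicate rank.size none)).foldl pvEmit "" == "" then uk
       else (rf.foldl (pvFill rank) (List.replicate rank.size none)).foldl pvEmit "") := by
  unfold build_display_name_alt; rw [h]

theorem pvAlt_none (tt : String) (rf : List (String × String)) (uk : String)
    (h : pvRank.get? tt = none) : build_display_name_alt tt rf uk = uk := by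
  unfold build_display_name_alt; rw [h]

-- the fill loop writes, into slot r, the FIRST row value whose key is ks[r]
-- string helper (via toList)
theorem pvStr_ne_empty_append (a b : String) (hb : b ≠ "") : a ++ b ≠ "" := by
  intro h
  apply hb
  apply String.toList_inj.mp
  have := congrArg String.toList h
  simp at this
  simp [this.2]

theorem pvJoin_singleton (p : String) : PySem.Str.join " | " [p] = p := by
  apply String.toList_inj.mp
  simp [PySem.Str.toList_join, PySem.Chars.join_singleton]

theorem pvJoin_cons_ne (p : String) (l : List String) (hl : l ≠ []) :
    PySem.Str.join " | " (p :: l) = p ++ " | " ++ PySem.Str.join " | " l := by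
  obtain ⟨q, rest, rfl⟩ : ∃ q rest, l = q :: rest := by
    cases l with
    | nil => exact absurd rfl hl
    | cons q rest => exact ⟨q, rest, rfl⟩
  apply String.toList_inj.mp
  simp [PySem.Str.toList_join, PySem.Chars.join_cons_cons]

theorem pvAJoin_nil : pvAJoin [] = "" := rfl

theorem pvAJoin_single (s : String) : pvAJoin [s] = s := by
  by_cases hs : s = ""
  · subst hs; rfl
  · have : [s].filter (fun p => p != "") = [s] := by simp [hs]
    rw [pvAJoin, this, pvJoin_singleton]

theorem pvAJoin_eq_empty_iff (ps : List String) :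
    pvAJoin ps = "" ↔ ps.filter (fun p => p != "") = [] := by
  unfold pvAJoin
  cases h : ps.filter (fun p => p != "") with
  | nil => simp [show PySem.Str.join " | " ([] : List String) = "" from rfl]
  | cons q rest =>
    have hq : q ≠ "" := by
      have hmem : q ∈ ps.filter (fun p => p != "") := by rw [h]; exact List.mem_cons_self
      have := (List.mem_filter.mp hmem).2
      simpa using this
    constructor
    · intro he
      exfalso
      cases rest with
      | nil => exact hq (by rw [pvJoin_singleton] at he; exact he)
      | cons r rest' =>
        have := congrArg String.toList he
        simp [PySem.Str.toList_join, PySem.Chars.join_cons_cons] at this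
    · intro he; exact absurd he (by simp)

theorem pvFill_loop (ks : List String) (rank : PySem.Dict String Nat)
    (hnd : ks.Nodup)
    (h1 : forall (r : Nat) (h : r < ks.length), rank.get? ks[r] = some r)
    (h2 : forall k, k ∉ ks → rank.get? k = none) :
    forall (rf : List (String × String)) (g : String → Option String),
      rf.foldl (pvFill rank) (ks.map g)
        = ks.map (fun k => (g k).or ((PySem.Dict.mk rf).get? k)) := by
  have hchar : forall k r, rank.get? k = some r → ∃ h : r < ks.length, ks[r] = k := by
    intro k r hk
    by_cases hm : k ∈ ks
    · obtain ⟨i, hi, hik⟩ := List.mem_iff_getElem.mp hm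
      have hgi := h1 i hi
      rw [hik] at hgi
      rw [hgi] at hk
      obtain rfl : i = r := by simpa using hk
      exact ⟨hi, hik⟩
    · rw [h2 k hm] at hk; exact absurd hk (by simp)
  intro rf
  induction rf with
  | nil =>
    intro g
    simp [PySem.Dict.get?]
  | cons kv rest ih =>
    intro g
    obtain ⟨k, v⟩ := kv
    rw [List.foldl_cons]
    cases hk : rank.get? k with
    | none =>
      have hnm : k ∉ ks := by
        intro hm
        obtain ⟨i, hi, hik⟩ := List.mem_iff_getElem.mp hm
        have := h1 i hi
        rw [hik, hk] at this
        exact absurd this (by simp)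
      have hstep : pvFill rank (ks.map g) (k, v) = ks.map g := by
        simp [pvFill, hk]
      rw [hstep, ih g]
      apply List.map_congr_left
      intro k' hk'
      have hne : k ≠ k' := fun he => hnm (he ▸ hk')
      rw [PySem.Dict.get?_mk_cons]
      simp [hne]
    | some r =>
      obtain ⟨hr, hkr⟩ := hchar k r hk
      have hgd : (ks.map g).getD r none = g k := by
        rw [List.getD_eq_getElem?_getD]
        simp [hr, hkr]
      cases hg : g k with
      | some w =>
        have hstep : pvFill rank (ks.map g) (k, v) = ks.map g := by
          simp only [pvFill, hk]
          rw [hgd, hg]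
          simp
        rw [hstep, ih g]
        apply List.map_congr_left
        intro k' hk'
        by_cases he : k' = k
        · subst he; simp [hg]
        · have hne : k ≠ k' := fun h => he h.symm
          rw [PySem.Dict.get?_mk_cons]
          simp [hne]
      | none =>
        have hstep : pvFill rank (ks.map g) (k, v)
            = ks.map (fun k' => if k' = k then some v else g k') := by
          have hset : (ks.map g).set r (some v)
              = ks.map (fun k' => if k' = k then some v else g k') := by
            apply List.ext_getElem
            · simp
            · intro i hi1 hi2
              have hi : i < ks.length := by simpa using hi2
              simp only [List.getElem_set, List.getElem_map]
              by_cases hir : r = i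
              · subst hir
                simp [hkr]
              · have hne : ks[i] ≠ k := by
                  intro he
                  apply hir
                  have : ks[i] = ks[r] := by rw [he, hkr]
                  exact ((List.Nodup.getElem_inj_iff hnd).mp this).symm
                simp [hir, hne]
          simp only [pvFill, hk]
          rw [hgd, hg]
          simpa using hset
        rw [hstep, ih (fun k' => if k' = k then some v else g k')]
        apply List.map_congr_left
        intro k' hk'
        by_cases he : k' = k
        · subst he
          rw [PySem.Dict.get?_mk_cons]
          simp [hg]
        · have hne : k ≠ k' := fun h => he h.symm
          rw [PySem.Dict.get?_mk_cons]
          simp [he, hne]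

theorem pvEmit_loop (ps : List String) :
    ∀ acc, (ps.foldl pvStep acc)
      = (if acc = "" then pvAJoin ps else if pvAJoin ps = "" then acc else acc ++ " | " ++ pvAJoin ps) := by
  induction ps with
  | nil =>
    intro acc
    by_cases ha : acc = "" <;> simp [ha, pvAJoin_nil]
  | cons p ps ih =>
    intro acc
    rw [List.foldl_cons]
    by_cases hp : p = ""
    · subst hp
      rw [show pvStep acc "" = acc from by simp [pvStep], ih acc]
      have hJ : pvAJoin ("" :: ps) = pvAJoin ps := by simp [pvAJoin]
      rw [hJ]
    · have hJcons : pvAJoin (p :: ps) = PySem.Str.join " | " (p :: ps.filter (fun q => q != "")) := by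
        unfold pvAJoin
        congr 1
        simp [hp]
      by_cases hf : ps.filter (fun q => q != "") = []
      · have hJps : pvAJoin ps = "" := (pvAJoin_eq_empty_iff ps).mpr hf
        have hJp : pvAJoin (p :: ps) = p := by rw [hJcons, hf, pvJoin_singleton]
        by_cases ha : acc = ""
        · subst ha
          rw [show pvStep "" p = p from by simp [pvStep, hp], ih p]
          simp [hp, hJps, hJp]
        · rw [show pvStep acc p = acc ++ " | " ++ p from by simp [pvStep, hp, ha],
              ih (acc ++ " | " ++ p)]
          have hane : acc ++ " | " ++ p ≠ "" := pvStr_ne_empty_append _ _ hp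
          simp [hane, hJps, ha, hJp, hp]
      · have hJps : pvAJoin ps ≠ "" := fun h => hf ((pvAJoin_eq_empty_iff ps).mp h)
        have hJp : pvAJoin (p :: ps) = p ++ " | " ++ pvAJoin ps := by
          rw [hJcons, pvJoin_cons_ne p _ hf]; rfl
        have hJpne : pvAJoin (p :: ps) ≠ "" := by
          rw [hJp]; exact pvStr_ne_empty_append _ _ hJps
        by_cases ha : acc = ""
        · subst ha
          rw [show pvStep "" p = p from by simp [pvStep, hp], ih p]
          simp [hp, hJps, hJp]
        · rw [show pvStep acc p = acc ++ " | " ++ p from by simp [pvStep, hp, ha],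
              ih (acc ++ " | " ++ p)]
          have hane : acc ++ " | " ++ p ≠ "" := pvStr_ne_empty_append _ _ hp
          rw [if_neg hane, if_neg hJps, if_neg ha, if_neg hJpne, hJp]
          apply String.toList_inj.mp
          simp

-- B's whole body, for a known key list, equals A's join-filter shape
theorem pvAlt_eval (ks : List String) (rank : PySem.Dict String Nat)
    (tt : String) (rf : List (String × String)) (uk : String)
    (hget : pvRank.get? tt = some rank)
    (hsz : rank.size = ks.length)
    (hnd : ks.Nodup)
    (h1 : ∀ (r : Nat) (h : r < ks.length), rank.get? ks[r] = some r)
    (h2 : ∀ k, k ∉ ks → rank.get? k = none) :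
    build_display_name_alt tt rf uk =
      (if pvAJoin (ks.map (pvAField rf)) == "" then uk else pvAJoin (ks.map (pvAField rf))) := by
  rw [pvAlt_some tt rf uk rank hget]
  have hrep : List.replicate rank.size (none : Option String) = ks.map (fun _ => none) := by
    rw [hsz, List.map_const']
  have hslots : rf.foldl (pvFill rank) (List.replicate rank.size none)
      = ks.map (fun k => (PySem.Dict.mk rf).get? k) := by
    rw [hrep, pvFill_loop ks rank hnd h1 h2 rf (fun _ => none)]
    simp
  rw [hslots]
  have hfold : (ks.map (fun k => (PySem.Dict.mk rf).get? k)).foldl pvEmit ""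
      = (ks.map (pvAField rf)).foldl pvStep "" := by
    rw [List.foldl_map, List.foldl_map]
    rfl
  rw [hfold, pvEmit_loop (ks.map (pvAField rf)) ""]
  simp

-- ===== VERDICT (by name: the statement is the Claim_ definition above) =====
theorem build_display_name_spec : Claim_equal_build_display_name := by
  intro tt rf uk _
  unfold Spec_build_display_name
  by_cases h1 : tt = "catalog"
  · subst h1
    rw [pvAlt_eval ["semantic_id"] (PySem.Dict.mk [("semantic_id", 0)]) _ rf uk rfl rfl (by decide)
        (by intro r h; simp only [List.length_cons, List.length_nil] at h; interval_cases r <;> rfl)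
        (by intro k hk
            simp only [List.mem_singleton] at hk
            simp [PySem.Dict.get?, Ne.symm hk])]
    simp [build_display_name, pvAJoin_single]
  by_cases h2 : tt = "dictionary"
  · subst h2
    rw [pvAlt_eval ["semantic_id"] (PySem.Dict.mk [("semantic_id", 0)]) _ rf uk rfl rfl (by decide)
        (by intro r h; simp only [List.length_cons, List.length_nil] at h; interval_cases r <;> rfl)
        (by intro k hk
            simp only [List.mem_singleton] at hk
            simp [PySem.Dict.get?, Ne.symm hk])]
    simp [build_display_name, pvAJoin_single]
  by_cases h3 : tt = "adt"
  · subst h3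
    rw [pvAlt_eval ["field_id", "semantic_id"] (PySem.Dict.mk [("field_id", 0), ("semantic_id", 1)]) _ rf uk rfl rfl (by decide)
        (by intro r h; simp only [List.length_cons, List.length_nil] at h; interval_cases r <;> rfl)
        (by intro k hk
            simp only [List.mem_cons, List.not_mem_nil, or_false, not_or] at hk
            simp [PySem.Dict.get?, Ne.symm hk.1, Ne.symm hk.2])]
    simp [build_display_name]
  by_cases h4 : tt = "ccda"
  · subst h4
    rw [pvAlt_eval ["semantic_id", "section_name", "entry_type", "xml_path"] (PySem.Dict.mk [("semantic_id", 0), ("section_name", 1), ("entry_type", 2), ("xml_path", 3)]) _ rf uk rfl rfl (by decide)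
        (by intro r h; simp only [List.length_cons, List.length_nil] at h; interval_cases r <;> rfl)
        (by intro k hk
            simp only [List.mem_cons, List.not_mem_nil, or_false, not_or] at hk
            simp [PySem.Dict.get?, Ne.symm hk.1, Ne.symm hk.2.1, Ne.symm hk.2.2.1, Ne.symm hk.2.2.2])]
    simp [build_display_name]
  by_cases h5 : tt = "availability"
  · subst h5
    rw [pvAlt_eval ["source_id", "semantic_id", "availability"] (PySem.Dict.mk [("source_id", 0), ("semantic_id", 1), ("availability", 2)]) _ rf uk rfl rfl (by decide)
        (by intro r h; simp only [List.length_cons, List.length_nil] at h; interval_cases r <;> rfl)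
        (by intro k hk
            simp only [List.mem_cons, List.not_mem_nil, or_false, not_or] at hk
            simp [PySem.Dict.get?, Ne.symm hk.1, Ne.symm hk.2.1, Ne.symm hk.2.2])]
    simp [build_display_name]
  by_cases h6 : tt = "fhir_inventory"
  · subst h6
    rw [pvAlt_eval ["semantic_id", "fhir_resource", "fhir_path"] (PySem.Dict.mk [("semantic_id", 0), ("fhir_resource", 1), ("fhir_path", 2)]) _ rf uk rfl rfl (by decide)
        (by intro r h; simp only [List.length_cons, List.length_nil] at h; interval_cases r <;> rfl)
        (by intro k hk
            simp only [List.mem_cons, List.not_mem_nil, or_false, not_or] at hk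
            simp [PySem.Dict.get?, Ne.symm hk.1, Ne.symm hk.2.1, Ne.symm hk.2.2])]
    simp [build_display_name]
  by_cases h7 : tt = "business_rules"
  · subst h7
    rw [pvAlt_eval ["semantic_id", "rule_id", "rule_name"] (PySem.Dict.mk [("semantic_id", 0), ("rule_id", 1), ("rule_name", 2)]) _ rf uk rfl rfl (by decide)
        (by intro r h; simp only [List.length_cons, List.length_nil] at h; interval_cases r <;> rfl)
        (by intro k hk
            simp only [List.mem_cons, List.not_mem_nil, or_false, not_or] at hk
            simp [PySem.Dict.get?, Ne.symm hk.1, Ne.symm hk.2.1, Ne.symm hk.2.2])]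
    simp [build_display_name]
  · have hnone : pvRank.get? tt = none := by
      simp [pvRank, PySem.Dict.get?, Ne.symm h1, Ne.symm h2, Ne.symm h3, Ne.symm h4, Ne.symm h5, Ne.symm h6, Ne.symm h7]
    rw [pvAlt_none tt rf uk hnone]
    simp [build_display_name, h1, h2, h3, h4, h5, h6, h7]
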